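-- pv_equiv track=rewrite | github.com/jjina-kkom/3AIM-seq | other/Poly(A)_Length_Measurement_byBaseCalls.py | count_mutations_afterL
-- ===== SOURCE A (Python) =====
-- def count_mutations_afterL(seq, start, homopolymer_base):
--     seq = seq[start:]
--     homopolymer_len = 0
--     point = 0
--     for base in seq:
--         point += 1
--         if base == homopolymer_base:
--             homopolymer_len += 1
--         else:
--             if point < 10:
--                 seq_window = seq[:10]
--                 mutCount = sum(base != homopolymer_base for base in seq_window)
--                 if mutCount > 1:
--                     break
--                 else:
--                     homopolymer_len += 1
--                     continue
--             else:
--                 seq_window = seq[point-10:point]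
--                 mutCount = sum(base != homopolymer_base for base in seq_window)
--                 if mutCount > 1:
--                     break
--                 else:
--                     homopolymer_len += 1
--                     continue
--     return homopolymer_len
-- ===== SOURCE B (Python) =====
-- def count_mutations_afterL(seq, start, homopolymer_base):
--     s = seq[start:]
--     n = len(s)
--     pre = [0]
--     m = 0
--     for c in s:
--         m += (c != homopolymer_base)
--         pre.append(m)
--     for i, c in enumerate(s):
--         if c == homopolymer_base:
--             continue
--         cnt = pre[min(10, n)] if i < 9 else pre[i + 1] - pre[i - 9]
--         if cnt > 1:
--             return i
--     return n
-- ===== Notes on version B (the rewrite author's own statement) =====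
-- stated objective: alternative
-- what changed: B precomputes one prefix-sum array of mismatch counts over the sliced sequence and decides each break test by two O(1) lookups, instead of A's re-summing a fresh 10-base sub-slice at every mismatching position.
import Mathlib
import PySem

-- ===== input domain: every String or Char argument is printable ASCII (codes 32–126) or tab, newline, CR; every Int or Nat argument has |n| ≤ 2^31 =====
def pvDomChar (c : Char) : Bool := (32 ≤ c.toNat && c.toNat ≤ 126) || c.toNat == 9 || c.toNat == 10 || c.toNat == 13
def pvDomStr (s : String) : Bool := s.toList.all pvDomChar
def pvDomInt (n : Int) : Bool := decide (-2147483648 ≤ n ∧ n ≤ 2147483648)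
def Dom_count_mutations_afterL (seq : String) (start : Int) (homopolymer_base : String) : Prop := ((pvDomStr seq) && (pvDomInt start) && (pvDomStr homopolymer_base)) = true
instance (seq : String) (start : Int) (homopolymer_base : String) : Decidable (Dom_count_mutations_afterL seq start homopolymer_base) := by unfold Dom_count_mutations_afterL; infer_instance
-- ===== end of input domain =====

-- B replaces A's per-mismatch re-summing of a fresh 10-base sub-slice by one precomputed
-- prefix-sum array of mismatch counts, read back with two O(1) lookups per position (objective: alternative).


-- ===== PORT A =====
-- sum(base != homopolymer_base for base in seq_window); each Python base is a 1-char string,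
-- so 'base == homopolymer_base' is [c] = homopolymer_base.toList
def pvMismSum (w : List Char) (hbl : List Char) : Int :=
  w.foldl (fun acc c => acc + (if [c] = hbl then 0 else 1)) 0

-- the for-loop of A with its break; full = the sliced seq (used by the window slices)
def pvALoop (full : List Char) (hbl : List Char) (hl point : Int) : List Char → Int
  | [] => hl
  | c :: rest =>
    let point := point + 1
    if [c] = hbl then pvALoop full hbl (hl + 1) point rest
    else if point < 10 then
      if pvMismSum (PySem.List.slice full none (some 10)) hbl > 1 then hl
      else pvALoop full hbl (hl + 1) point rest
    else
      if pvMismSum (PySem.List.slice full (some (point - 10)) (some point)) hbl > 1 then hl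
      else pvALoop full hbl (hl + 1) point rest

def count_mutations_afterL (seq : String) (start : Int) (homopolymer_base : String) : Int :=
  let s := PySem.List.slice seq.toList (some start) none
  pvALoop s homopolymer_base.toList 0 0 s

-- ===== PORT B =====
-- pre.append(m) loop of Source B: the prefix-sum tail (the leading 0 is consed on at the call site)
def pvBuildPre (hbl : List Char) (m : Int) : List Char → List Int
  | [] => []
  | c :: rest =>
    let m := m + (if [c] = hbl then 0 else 1)
    m :: pvBuildPre hbl m rest

-- pre[k]; every index Source B uses is in range, so the default is never taken
def pvPreAt (pre : List Int) (k : Int) : Int := (PySem.List.pyGet? pre k).getD 0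

-- the enumerate loop of Source B with its early return
def pvBLoop (hbl : List Char) (pre : List Int) (n : Int) (i : Int) : List Char → Int
  | [] => n
  | c :: rest =>
    if [c] = hbl then pvBLoop hbl pre n (i + 1) rest
    else
      let cnt := if i < 9 then pvPreAt pre (min 10 n) else pvPreAt pre (i + 1) - pvPreAt pre (i - 9)
      if cnt > 1 then i else pvBLoop hbl pre n (i + 1) rest

def count_mutations_afterL_alt (seq : String) (start : Int) (homopolymer_base : String) : Int :=
  let s := PySem.List.slice seq.toList (some start) none
  let n : Int := s.length
  let pre := 0 :: pvBuildPre homopolymer_base.toList 0 s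
  pvBLoop homopolymer_base.toList pre n 0 s

-- ===== PRECONDITION & SPEC =====
def Spec_count_mutations_afterL (seq : String) (start : Int) (homopolymer_base : String) (out : Int) : Prop := out = count_mutations_afterL_alt seq start homopolymer_base
instance (seq : String) (start : Int) (homopolymer_base : String) (out : Int) : Decidable (Spec_count_mutations_afterL seq start homopolymer_base out) := by unfold Spec_count_mutations_afterL; infer_instance

-- ===== CLAIM (what is proved, stated in full; the proofs are below) =====
def Claim_equal_count_mutations_afterL : Prop := ∀ (seq : String) (start : Int) (homopolymer_base : String), Dom_count_mutations_afterL seq start homopolymer_base → Spec_count_mutations_afterL seq start homopolymer_base (count_mutations_afterL seq start homopolymer_base)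

-- ===== LEMMAS AND PROOFS =====

-- mismatch count of a list, the common value both window computations produce
def pvC (hbl : List Char) (l : List Char) : Int := (l.countP (fun c => !([c] = hbl : Bool)) : Nat)

theorem pvC_nil (hbl : List Char) : pvC hbl [] = 0 := rfl

theorem pvC_cons (hbl : List Char) (c : Char) (l : List Char) :
    pvC hbl (c :: l) = (if [c] = hbl then 0 else 1) + pvC hbl l := by
  by_cases hc : [c] = hbl
  · simp [pvC, hc]
  · simp [pvC, hc]
    ring

theorem pvMismSum_eq (hbl : List Char) (w : List Char) : pvMismSum w hbl = pvC hbl w := by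
  have h : ∀ (w : List Char) (acc : Int),
      w.foldl (fun acc c => acc + (if [c] = hbl then 0 else 1)) acc = acc + pvC hbl w := by
    intro w
    induction w with
    | nil => intro acc; simp [pvC_nil]
    | cons c rs ih => intro acc; rw [List.foldl_cons, ih, pvC_cons]; ring
  simpa [pvMismSum] using h w 0

theorem pvBuildPre_get (hbl : List Char) :
    ∀ (s : List Char) (m : Int) (j : Nat), j < s.length →
      (pvBuildPre hbl m s)[j]? = some (m + pvC hbl (s.take (j + 1))) := by
  intro s
  induction s with
  | nil => intro m j h; simp at h
  | cons c rs ih =>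
    intro m j h
    cases j with
    | zero =>
      show (pvBuildPre hbl m (c :: rs))[0]? = _
      rw [List.take_succ_cons, List.take_zero, pvC_cons, pvC_nil]
      simp [pvBuildPre]
    | succ j =>
      have hj : j < rs.length := by simpa using h
      show (pvBuildPre hbl m (c :: rs))[j + 1]? = _
      rw [List.take_succ_cons, pvC_cons]
      simp only [pvBuildPre, List.getElem?_cons_succ]
      rw [ih _ j hj]
      congr 1
      ring

theorem pvPreAt_spec (hbl : List Char) (s : List Char) (k : Nat) (hk : k ≤ s.length) :
    pvPreAt (0 :: pvBuildPre hbl 0 s) (k : Int) = pvC hbl (s.take k) := by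
  unfold pvPreAt
  have hget : PySem.List.pyGet? (0 :: pvBuildPre hbl 0 s) (k : Int)
      = (0 :: pvBuildPre hbl 0 s)[k]? := by simp [pysem]
  rw [hget]
  cases k with
  | zero => simp [pvC_nil]
  | succ j =>
    have hj : j < s.length := by omega
    simp [pvBuildPre_get hbl s 0 j hj]

theorem pvC_window (hbl : List Char) (s : List Char) (a b : Nat) (hab : a ≤ b) :
    pvC hbl ((s.drop a).take (b - a)) = pvC hbl (s.take b) - pvC hbl (s.take a) := by
  have hsplit : s.take b = s.take a ++ (s.drop a).take (b - a) := by
    rw [← List.take_add]; congr 1; omega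
  simp [pvC, hsplit, List.countP_append]

theorem pvMain (hbl : List Char) (s : List Char) :
    ∀ (rest : List Char) (i : Nat), i ≤ s.length → rest = s.drop i →
      pvALoop s hbl (i : Int) (i : Int) rest
        = pvBLoop hbl (0 :: pvBuildPre hbl 0 s) (s.length : Int) (i : Int) rest := by
  intro rest
  induction rest with
  | nil =>
    intro i hi hdrop
    have hlen : s.length ≤ i := List.drop_eq_nil_iff.mp hdrop.symm
    have : i = s.length := le_antisymm hi hlen
    simp [pvALoop, pvBLoop, this]
  | cons c rs ih =>
    intro i hi hdrop
    have hilt : i < s.length := by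
      by_contra h
      have : s.drop i = [] := List.drop_eq_nil_iff.mpr (by omega)
      rw [this] at hdrop; exact absurd hdrop (by simp)
    have hrs : rs = s.drop (i + 1) := by
      have := congrArg List.tail hdrop
      simpa [List.tail_drop] using this
    have hcast : (i : Int) + 1 = ((i + 1 : Nat) : Int) := by push_cast; ring
    by_cases hc : [c] = hbl
    · simp only [pvALoop, pvBLoop, if_pos hc, hcast]
      exact ih (i + 1) (by omega) hrs
    · simp only [pvALoop, pvBLoop, if_neg hc]
      by_cases h9 : i < 9
      · rw [if_pos (show (i : Int) + 1 < 10 by omega), if_pos (show (i : Int) < 9 by omega)]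
        have hmin : min 10 ((s.length : Nat) : Int) = ((min 10 s.length : Nat) : Int) := by omega
        have hwin : pvMismSum (PySem.List.slice s none (some 10)) hbl
            = pvPreAt (0 :: pvBuildPre hbl 0 s) (min 10 ((s.length : Nat) : Int)) := by
          rw [hmin, pvPreAt_spec hbl s (min 10 s.length) (by omega)]
          have h10 : PySem.List.slice s none (some 10) = s.take 10 := by
            have := PySem.List.slice_to_natCast (xs := s) (b := 10); simpa using this
          rw [h10, pvMismSum_eq]
          congr 1
          simp
        rw [hwin]
        split_ifs with hbig
        · rfl
        · rw [hcast]; exact ih (i + 1) (by omega) hrs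
      · rw [if_neg (show ¬((i : Int) + 1 < 10) by omega), if_neg (show ¬((i : Int) < 9) by omega)]
        have ha : (i : Int) + 1 - 10 = ((i - 9 : Nat) : Int) := by omega
        have ha2 : (i : Int) - 9 = ((i - 9 : Nat) : Int) := by omega
        have hwin : pvMismSum (PySem.List.slice s (some ((i : Int) + 1 - 10)) (some ((i : Int) + 1))) hbl
            = pvPreAt (0 :: pvBuildPre hbl 0 s) ((i : Int) + 1)
              - pvPreAt (0 :: pvBuildPre hbl 0 s) ((i : Int) - 9) := by
          rw [ha, ha2, hcast, PySem.List.slice_natCast, pvMismSum_eq,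
            pvPreAt_spec hbl s (i + 1) (by omega), pvPreAt_spec hbl s (i - 9) (by omega),
            pvC_window hbl s (i - 9) (i + 1) (by omega)]
        rw [hwin]
        split_ifs with hbig
        · rfl
        · rw [hcast]; exact ih (i + 1) (by omega) hrs

-- ===== VERDICT (by name: the statement is the Claim_ definition above) =====
theorem count_mutations_afterL_spec : Claim_equal_count_mutations_afterL := by
  intro seq start hb _
  show count_mutations_afterL seq start hb = count_mutations_afterL_alt seq start hb
  unfold count_mutations_afterL count_mutations_afterL_alt
  exact pvMain hb.toList _ _ 0 (Nat.zero_le _) rfl
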